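-- pv_equiv track=rewrite | github.com/charlieyang1557/boardgame-rules-RAG | ingestion/chunker.py | _merge_consecutive_sections
-- ===== SOURCE A (Python) =====
-- def _merge_consecutive_sections(pages: list[dict], keep_intact_sections: set[str]) -> list[dict]:
--     """Merge consecutive pages with the same section when keep_intact is set.
--
--     This handles multi-page sections like Dinnertime that must not be split.
--     Pages with sections NOT in keep_intact_sections pass through unchanged.
--     """
--     if not keep_intact_sections:
--         return pages
--
--     merged: list[dict] = []
--     i = 0
--     while i < len(pages):
--         page = pages[i]
--         section = page.get("section", "General")
--
--         if section in keep_intact_sections: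
--             # Merge consecutive pages with same section
--             combined_text = page["text"]
--             first_page = page["page"]
--             j = i + 1
--             while j < len(pages) and pages[j].get("section", "General") == section:
--                 combined_text += "\n\n" + pages[j]["text"]
--                 j += 1
--             merged.append({
--                 "page": first_page,
--                 "text": combined_text,
--                 "section": section,
--             })
--             i = j
--         else:
--             merged.append(page)
--             i += 1
--
--     return merged
-- ===== SOURCE B (Python) =====
-- def _merge_consecutive_sections(pages: list[dict], keep_intact_sections: set[str]) -> list[dict]:
--     """Single pass: fold each page into the output, extending the last emitted
--     merged dict while the keep-intact section continues (no index/inner-while scan)."""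
--     if not keep_intact_sections:
--         return pages
--
--     merged: list[dict] = []
--     prev_section = None
--     for page in pages:
--         section = page.get("section", "General")
--         if section in keep_intact_sections:
--             if prev_section == section:
--                 merged[-1]["text"] += "\n\n" + page["text"]
--             else:
--                 merged.append({
--                     "page": page["page"],
--                     "text": page["text"],
--                     "section": section,
--                 })
--         else:
--             merged.append(page)
--         prev_section = section
--     return merged
-- ===== Notes on version B (the rewrite author's own statement) =====
-- stated objective: simpler
-- what changed: Replaced A's index-based outer-while with an inner-while run scan by a single for-pass that tracks the previous page's section and extends the text of the last emitted merged dict while a keep-intact section continues.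
import Mathlib
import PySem

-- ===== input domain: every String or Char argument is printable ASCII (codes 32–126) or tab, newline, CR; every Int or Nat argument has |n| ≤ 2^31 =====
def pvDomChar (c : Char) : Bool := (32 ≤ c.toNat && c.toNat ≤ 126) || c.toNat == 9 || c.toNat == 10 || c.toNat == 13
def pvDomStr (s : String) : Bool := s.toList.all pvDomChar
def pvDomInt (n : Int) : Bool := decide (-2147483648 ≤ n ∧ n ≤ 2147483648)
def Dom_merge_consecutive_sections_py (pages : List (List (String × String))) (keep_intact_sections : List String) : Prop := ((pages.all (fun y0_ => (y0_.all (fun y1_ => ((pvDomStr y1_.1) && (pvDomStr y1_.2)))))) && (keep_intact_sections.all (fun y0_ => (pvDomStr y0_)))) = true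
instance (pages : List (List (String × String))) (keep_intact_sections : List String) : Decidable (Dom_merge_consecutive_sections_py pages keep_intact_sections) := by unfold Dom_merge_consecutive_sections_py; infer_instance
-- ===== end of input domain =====

-- B replaces A's index-based outer-while/inner-while run scanning by a single pass that
-- extends the last emitted merged dict while a keep-intact section continues (objective: simpler).

-- ===== PORT A =====
-- shared dict primitives: page.get(k, d) = first match in the association list (exact for
-- Python dicts, which have unique keys); pvText/pvPage are the total forms of page["text"] /
-- page["page"] — a missing key is a KeyError in Python and is excluded by Pre_ below.
def pvGet (p : List (String × String)) (k d : String) : String :=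
  match p.find? (fun kv => kv.1 == k) with
  | some kv => kv.2
  | none => d

def pvSect (p : List (String × String)) : String := pvGet p "section" "General"
def pvText (p : List (String × String)) : String := pvGet p "text" ""
def pvPage (p : List (String × String)) : String := pvGet p "page" ""

def pvHasKey (p : List (String × String)) (k : String) : Bool :=
  (p.find? (fun kv => kv.1 == k)).isSome

-- inner while loop of A: scan forward while the section stays equal, accumulating text
def pvInnerA (s : String) : List (List (String × String)) → String →
    String × List (List (String × String))
  | [], acc => (acc, [])
  | q :: qs, acc =>
    if pvSect q = s then pvInnerA s qs (acc ++ "\n\n" ++ pvText q) else (acc, q :: qs)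

theorem pvInnerA_len (s : String) : ∀ (l : List (List (String × String))) (acc : String),
    (pvInnerA s l acc).2.length ≤ l.length := by
  intro l
  induction l with
  | nil => intro acc; simp [pvInnerA]
  | cons q qs ih =>
    intro acc
    simp only [pvInnerA]
    split
    · exact le_trans (ih _) (by simp)
    · simp

-- outer while loop of A
def pvGoA (keep : List String) : List (List (String × String)) → List (List (String × String))
  | [] => []
  | p :: rest =>
    let s := pvSect p
    if s ∈ keep then
      let r := pvInnerA s rest (pvText p)
      [("page", pvPage p), ("text", r.1), ("section", s)] :: pvGoA keep r.2
    else p :: pvGoA keep rest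
termination_by l => l.length
decreasing_by
  · have := pvInnerA_len (pvSect p) rest (pvText p)
    simp only [List.length_cons]; omega
  · simp

def merge_consecutive_sections_py (pages : List (List (String × String))) (keep_intact_sections : List String) : List (List (String × String)) :=
  if keep_intact_sections = [] then pages else pvGoA keep_intact_sections pages

-- ===== PORT B =====
-- merged[-1]["text"] += "\n\n" + t : update the first "text" entry of the last emitted dict
def pvAddText : List (String × String) → String → List (String × String)
  | [], _ => []
  | (k, v) :: rest, t =>
    if k == "text" then (k, v ++ "\n\n" ++ t) :: rest else (k, v) :: pvAddText rest t

-- B's single for-loop; acc holds the merged list in reverse (append = cons), prev_section as Option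
def pvGoB (keep : List String) : List (List (String × String)) → Option String →
    List (List (String × String)) → List (List (String × String))
  | [], _, acc => acc.reverse
  | p :: rest, prev, acc =>
    let s := pvSect p
    if s ∈ keep then
      if prev = some s then
        pvGoB keep rest (some s)
          (match acc with
           | [] => []            -- unreachable: prev = some s implies acc ≠ []
           | d :: ds => pvAddText d (pvText p) :: ds)
      else pvGoB keep rest (some s) ([("page", pvPage p), ("text", pvText p), ("section", s)] :: acc)
    else pvGoB keep rest (some s) (p :: acc)


def merge_consecutive_sections_py_alt (pages : List (List (String × String))) (keep_intact_sections : List String) : List (List (String × String)) :=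
  if keep_intact_sections = [] then pages else pvGoB keep_intact_sections pages none []

-- ===== PRECONDITION & SPEC =====
-- Pre_ excludes exactly the inputs on which Python A raises KeyError: with a non-empty keep
-- set, every page whose section is kept must have a "text" key, and additionally a "page"
-- key when it starts a run (first page, or the previous page has a different section).
def Pre_merge_consecutive_sections_py (pages : List (List (String × String))) (keep_intact_sections : List String) : Prop :=
  keep_intact_sections = [] ∨
    ∀ i : Nat, i < pages.length →
      pvSect (pages.getD i []) ∈ keep_intact_sections →
        pvHasKey (pages.getD i []) "text" = true ∧
        ((i = 0 ∨ pvSect (pages.getD (i - 1) []) ≠ pvSect (pages.getD i [])) →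
          pvHasKey (pages.getD i []) "page" = true)
instance (pages : List (List (String × String))) (keep_intact_sections : List String) : Decidable (Pre_merge_consecutive_sections_py pages keep_intact_sections) := by unfold Pre_merge_consecutive_sections_py; infer_instance

def pvWitness_merge_consecutive_sections_py : (List (List (String × String))) × List String :=
  ([[("page", "1"), ("text", "a"), ("section", "S")],
    [("page", "2"), ("text", "b"), ("section", "S")],
    [("text", "c"), ("section", "T")]], ["S"])

def Spec_merge_consecutive_sections_py (pages : List (List (String × String))) (keep_intact_sections : List String) (out : List (List (String × String))) : Prop := out = merge_consecutive_sections_py_alt pages keep_intact_sections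
instance (pages : List (List (String × String))) (keep_intact_sections : List String) (out : List (List (String × String))) : Decidable (Spec_merge_consecutive_sections_py pages keep_intact_sections out) := by unfold Spec_merge_consecutive_sections_py; infer_instance

-- ===== CLAIM (what is proved, stated in full; the proofs are below) =====
def Claim_equal_merge_consecutive_sections_py : Prop := ∀ (pages : List (List (String × String))) (keep_intact_sections : List String), Dom_merge_consecutive_sections_py pages keep_intact_sections → Pre_merge_consecutive_sections_py pages keep_intact_sections → Spec_merge_consecutive_sections_py pages keep_intact_sections (merge_consecutive_sections_py pages keep_intact_sections)

-- ===== LEMMAS AND PROOFS =====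

-- one-step unfolding of B's loop
theorem pvGoB_cons (keep : List String) (p : List (String × String))
    (rest : List (List (String × String))) (prev : Option String)
    (acc : List (List (String × String))) :
    pvGoB keep (p :: rest) prev acc =
      (if pvSect p ∈ keep then
        if prev = some (pvSect p) then
          pvGoB keep rest (some (pvSect p))
            (match acc with
             | [] => []
             | d :: ds => pvAddText d (pvText p) :: ds)
        else pvGoB keep rest (some (pvSect p))
          ([("page", pvPage p), ("text", pvText p), ("section", pvSect p)] :: acc)
      else pvGoB keep rest (some (pvSect p)) (p :: acc)) := rfl

-- pvInnerA is the fold of the text accumulator over the takeWhile prefix, leaving the dropWhile suffix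
theorem pvInnerA_eq_span (s : String) : ∀ (l : List (List (String × String))) (acc : String),
    pvInnerA s l acc =
      ((l.takeWhile (fun q => pvSect q == s)).foldl (fun a q => a ++ "\n\n" ++ pvText q) acc,
       l.dropWhile (fun q => pvSect q == s)) := by
  intro l
  induction l with
  | nil => intro acc; simp [pvInnerA]
  | cons q qs ih =>
    intro acc
    by_cases h : pvSect q = s
    · simp [pvInnerA, h, ih]
    · simp [pvInnerA, h]

-- folding pvAddText over the freshly created merged dict only grows its "text" field
theorem pvAddText_fold (P S : String) :
    ∀ (tw : List (List (String × String))) (T : String),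
      tw.foldl (fun d q => pvAddText d (pvText q)) [("page", P), ("text", T), ("section", S)] =
        [("page", P), ("text", tw.foldl (fun a q => a ++ "\n\n" ++ pvText q) T), ("section", S)] := by
  intro tw
  induction tw with
  | nil => intro T; simp
  | cons q qs ih =>
    intro T
    simp only [List.foldl_cons]
    rw [show pvAddText [("page", P), ("text", T), ("section", S)] (pvText q) =
          [("page", P), ("text", T ++ "\n\n" ++ pvText q), ("section", S)] by
        simp [pvAddText]]
    exact ih _

-- while the section continues, B extends the head of the reversed accumulator
theorem pvGoB_run (keep : List String) (s : String) (hs : s ∈ keep) :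
    ∀ (tw dw : List (List (String × String))) (d : List (String × String))
      (acc : List (List (String × String))),
      (∀ q ∈ tw, pvSect q = s) →
      pvGoB keep (tw ++ dw) (some s) (d :: acc) =
        pvGoB keep dw (some s) ((tw.foldl (fun d q => pvAddText d (pvText q)) d) :: acc) := by
  intro tw
  induction tw with
  | nil => intro dw d acc _; simp
  | cons q qs ih =>
    intro dw d acc hall
    have hq : pvSect q = s := hall q (by simp)
    simp only [List.cons_append, pvGoB, hq, if_pos hs, List.foldl_cons]
    exact ih dw _ acc (fun x hx => hall x (by simp [hx]))

-- the head of a dropWhile fails the predicate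
theorem head_dropWhile_false {α : Type} (p : α → Bool) :
    ∀ (l : List α) (x : α) (xs : List α), l.dropWhile p = x :: xs → p x = false := by
  intro l
  induction l with
  | nil => intro x xs h; simp [List.dropWhile] at h
  | cons a as ih =>
    intro x xs h
    by_cases ha : p a = true
    · rw [List.dropWhile_cons_of_pos ha] at h; exact ih x xs h
    · rw [List.dropWhile_cons_of_neg ha] at h
      cases h; simpa using ha

-- main invariant: with a safe prev marker, B's pass produces acc.reverse ++ A's result
theorem pvGoB_eq_goA (keep : List String) :
    ∀ (n : Nat) (l : List (List (String × String))) (prev : Option String)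
      (acc : List (List (String × String))),
      l.length ≤ n →
      (∀ p l', l = p :: l' → pvSect p ∈ keep → prev ≠ some (pvSect p)) →
      pvGoB keep l prev acc = acc.reverse ++ pvGoA keep l := by
  intro n
  induction n with
  | zero =>
    intro l prev acc hn _
    have : l = [] := List.eq_nil_of_length_eq_zero (Nat.le_zero.mp hn)
    subst this; simp [pvGoB, pvGoA]
  | succ n ih =>
    intro l prev acc hn hsafe
    match l with
    | [] => simp [pvGoB, pvGoA]
    | p :: rest =>
      by_cases hk : pvSect p ∈ keep
      · -- keep branch: a fresh run starts (prev ≠ some s by hsafe)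
        set s := pvSect p with hsdef
        have hprev : prev ≠ some s := hsafe p rest rfl hk
        set tw := rest.takeWhile (fun q => pvSect q == s) with htw
        set dw := rest.dropWhile (fun q => pvSect q == s) with hdw
        have hsplit : rest = tw ++ dw := (List.takeWhile_append_dropWhile).symm
        have htwall : ∀ q ∈ tw, pvSect q = s := by
          intro q hq
          have := List.mem_takeWhile_imp hq
          simpa using this
        have hinner : pvInnerA s rest (pvText p) =
            (tw.foldl (fun a q => a ++ "\n\n" ++ pvText q) (pvText p), dw) := by
          rw [pvInnerA_eq_span]
        -- unfold one step of pvGoA on the right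
        conv_rhs => rw [pvGoA]
        -- unfold one step of pvGoB on the left
        rw [pvGoB_cons, if_pos hk, if_neg hprev]
        rw [hsplit, pvGoB_run keep s hk tw dw _ acc htwall]
        rw [pvAddText_fold]
        have hdwsafe : ∀ q l', dw = q :: l' → pvSect q ∈ keep → (some s : Option String) ≠ some (pvSect q) := by
          intro q l' hqe _
          have : (pvSect q == s) = false := head_dropWhile_false _ rest q l' (hdw ▸ hqe)
          simp only [beq_eq_false_iff_ne, ne_eq] at this
          intro hcontr
          exact this (by injection hcontr with h; exact h.symm)
        have hlen : dw.length ≤ n := by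
          have h1 : dw.length ≤ rest.length := by
            rw [hdw]; exact (List.dropWhile_sublist _).length_le
          have h2 : rest.length ≤ n := by simpa using Nat.lt_succ_iff.mp (Nat.lt_of_lt_of_le (by simp) hn)
          omega
        rw [ih dw (some s) _ hlen hdwsafe]
        rw [hsplit] at hinner
        simp only [← hsdef, if_pos hk, hinner]
        simp
      · -- pass-through branch
        rw [pvGoB_cons, if_neg hk]
        have hrsafe : ∀ q l', rest = q :: l' → pvSect q ∈ keep →
            (some (pvSect p) : Option String) ≠ some (pvSect q) := by
          intro q l' _ hqk hcontr
          injection hcontr with h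
          exact hk (h ▸ hqk)
        have hlen : rest.length ≤ n := by simpa using Nat.lt_succ_iff.mp (Nat.lt_of_lt_of_le (by simp) hn)
        rw [ih rest (some (pvSect p)) _ hlen hrsafe]
        conv_rhs => rw [pvGoA]
        simp [if_neg hk]

-- ===== VERDICT (by name: the statement is the Claim_ definition above) =====
theorem merge_consecutive_sections_py_spec : Claim_equal_merge_consecutive_sections_py := by
  intro pages keep _ _
  unfold Spec_merge_consecutive_sections_py
  unfold merge_consecutive_sections_py merge_consecutive_sections_py_alt
  by_cases hk : keep = []
  · simp [hk]
  · simp only [if_neg hk]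
    exact (pvGoB_eq_goA keep pages.length pages none [] le_rfl
      (by intro p l' _ _ h; simp at h)).symm
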